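-- pv_equiv track=rewrite | github.com/vrthra/pygram | tests/test_basic.py | basic_parse
-- ===== SOURCE A (Python) =====
-- def basic_parse(astr):
--     astr=astr.replace(',','')
--     astr=astr.replace('and','')
--     tokens=astr.split()
--     dept=None
--     number=None
--     result=[]
--     option=[]
--     for tok in tokens:
--         if tok=='or':
--             result.append(option)
--             option=[]
--             continue
--         if tok.isalpha():
--             dept=tok
--             number=None
--         else:
--             number=tok
--         if dept and number:
--             option.append((dept,number))
--     else:
--         if option:
--             result.append(option)
--     return result
-- ===== SOURCE B (Python) =====
-- def _parse_group(g, dept):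
--     option = []
--     for t in g:
--         if t.isalpha():
--             dept = t
--         elif dept is not None:
--             option.append((dept, t))
--     return option, dept
--
--
-- def basic_parse(astr):
--     toks = astr.replace(',', '').replace('and', '').split()
--     # partition tokens into groups delimited by 'or'
--     groups = []
--     cur = []
--     for t in toks:
--         if t == 'or':
--             groups.append(cur)
--             cur = []
--         else:
--             cur.append(t)
--     result = []
--     dept = None
--     for g in groups:
--         option, dept = _parse_group(g, dept)
--         result.append(option)
--     option, dept = _parse_group(cur, dept)
--     if option:
--         result.append(option)
--     return result
-- ===== Notes on version B (the rewrite author's own statement) =====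
-- stated objective: simpler
-- what changed: A runs one stateful token loop juggling dept/number/result/option with a for-else finish; B first partitions the tokens into 'or'-delimited groups and then parses each group with a small helper that threads only the running dept, appending every full group unconditionally and the trailing group only if non-empty.
import Mathlib
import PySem

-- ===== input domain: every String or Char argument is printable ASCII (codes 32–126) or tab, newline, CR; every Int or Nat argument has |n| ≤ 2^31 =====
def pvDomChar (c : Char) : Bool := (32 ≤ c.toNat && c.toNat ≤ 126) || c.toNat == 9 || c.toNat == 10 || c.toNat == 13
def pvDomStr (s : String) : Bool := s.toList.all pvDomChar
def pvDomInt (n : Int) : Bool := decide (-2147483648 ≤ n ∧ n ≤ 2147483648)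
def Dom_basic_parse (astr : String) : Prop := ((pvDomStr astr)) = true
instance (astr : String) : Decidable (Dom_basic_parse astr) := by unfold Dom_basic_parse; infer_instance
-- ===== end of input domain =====

-- B re-decomposes the single stateful token loop into: split the tokens into 'or'-delimited
-- groups, then parse each group with a helper threading only the running dept (objective: simpler).

-- ===== PORT A =====
def basic_parse (astr : String) : List (List (String × String)) :=
  let astr := PySem.Str.replace astr "," ""
  let astr := PySem.Str.replace astr "and" ""
  let tokens := PySem.Str.split₀ astr
  let st := tokens.foldl
    (fun (st : Option String × Option String × List (List (String × String)) × List (String × String)) tok =>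
      let dept := st.1
      let result := st.2.2.1
      let option := st.2.2.2
      if tok == "or" then
        (dept, st.2.1, result ++ [option], [])
      else
        let dn := if PySem.Str.strIsalpha tok then ((some tok), (none : Option String))
                  else (dept, some tok)
        let option := match dn.1, dn.2 with
          | some d, some n => option ++ [(d, n)]
          | _, _ => option
        (dn.1, dn.2, result, option))
    (none, none, [], [])
  if st.2.2.2 ≠ [] then st.2.2.1 ++ [st.2.2.2] else st.2.2.1

-- ===== PORT B =====
-- helper _parse_group of Source B
def pvParseGroup (g : List String) (dept : Option String) :
    List (String × String) × Option String :=
  g.foldl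
    (fun (st : List (String × String) × Option String) t =>
      if PySem.Str.strIsalpha t then (st.1, some t)
      else match st.2 with
        | some d => (st.1 ++ [(d, t)], st.2)
        | none => st)
    ([], dept)

def basic_parse_alt (astr : String) : List (List (String × String)) :=
  let toks := PySem.Str.split₀ (PySem.Str.replace (PySem.Str.replace astr "," "") "and" "")
  let gc := toks.foldl
    (fun (p : List (List String) × List String) t =>
      if t == "or" then (p.1 ++ [p.2], []) else (p.1, p.2 ++ [t]))
    ([], [])
  let rd := gc.1.foldl
    (fun (p : List (List (String × String)) × Option String) g =>
      let od := pvParseGroup g p.2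
      (p.1 ++ [od.1], od.2))
    ([], none)
  let od := pvParseGroup gc.2 rd.2
  if od.1 ≠ [] then rd.1 ++ [od.1] else rd.1

-- ===== PRECONDITION & SPEC =====
def Spec_basic_parse (astr : String) (out : List (List (String × String))) : Prop := out = basic_parse_alt astr
instance (astr : String) (out : List (List (String × String))) : Decidable (Spec_basic_parse astr out) := by unfold Spec_basic_parse; infer_instance

-- ===== CLAIM (what is proved, stated in full; the proofs are below) =====
def Claim_equal_basic_parse : Prop := ∀ (astr : String), Dom_basic_parse astr → Spec_basic_parse astr (basic_parse astr)

-- ===== LEMMAS AND PROOFS =====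

-- reference semantics: process the token stream directly
def pvRun : List String → Option String → List (String × String) → List (List (String × String))
  | [], _, option => if option ≠ [] then [option] else []
  | t :: ts, dept, option =>
    if t == "or" then option :: pvRun ts dept []
    else if PySem.Str.strIsalpha t then pvRun ts (some t) option
    else match dept with
      | some d => pvRun ts dept (option ++ [(d, t)])
      | none => pvRun ts none option

-- A's fold computes pvRun
theorem pvA_run (ts : List String) :
    ∀ (dept number : Option String) (result : List (List (String × String)))
      (option : List (String × String)),
    (let st := ts.foldl
      (fun (st : Option String × Option String × List (List (String × String)) × List (String × String)) tok =>
        let dept := st.1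
        let result := st.2.2.1
        let option := st.2.2.2
        if tok == "or" then
          (dept, st.2.1, result ++ [option], [])
        else
          let dn := if PySem.Str.strIsalpha tok then ((some tok), (none : Option String))
                    else (dept, some tok)
          let option := match dn.1, dn.2 with
            | some d, some n => option ++ [(d, n)]
            | _, _ => option
          (dn.1, dn.2, result, option))
      (dept, number, result, option)
     if st.2.2.2 ≠ [] then st.2.2.1 ++ [st.2.2.2] else st.2.2.1)
    = result ++ pvRun ts dept option := by
  induction ts with
  | nil =>
    intro dept number result option
    simp only [List.foldl, pvRun]
    split <;> simp
  | cons t ts ih =>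
    intro dept number result option
    simp only [List.foldl, pvRun]
    by_cases hor : t == "or"
    · simp only [hor, if_pos] -- reduceIte]
      rw [ih]
      simp
    · simp only [hor, Bool.false_eq_true, reduceIte]
      by_cases ha : PySem.Str.strIsalpha t
      · simp only [ha, reduceIte]
        exact ih _ _ _ _
      · simp only [ha, Bool.false_eq_true, reduceIte]
        cases dept with
        | none => exact ih _ _ _ _
        | some d => exact ih _ _ _ _

def pvSplitOr : List String → List String → List (List String) × List String
  | [], cur => ([], cur)
  | t :: ts, cur =>
    if t == "or" then
      let p := pvSplitOr ts []
      (cur :: p.1, p.2)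
    else pvSplitOr ts (cur ++ [t])

-- B's first fold computes pvSplitOr
theorem pvB_split (ts : List String) :
    ∀ (G : List (List String)) (cur : List String),
    ts.foldl
      (fun (p : List (List String) × List String) t =>
        if t == "or" then (p.1 ++ [p.2], []) else (p.1, p.2 ++ [t]))
      (G, cur)
    = (G ++ (pvSplitOr ts cur).1, (pvSplitOr ts cur).2) := by
  induction ts with
  | nil => intro G cur; simp [pvSplitOr]
  | cons t ts ih =>
    intro G cur
    simp only [List.foldl, pvSplitOr]
    by_cases hor : t == "or"
    · simp only [hor, if_pos]
      rw [ih]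
      simp
    · simp only [hor, Bool.false_eq_true, reduceIte]
      exact ih _ _

-- parse_group started from an arbitrary option accumulator
def pvParseGroupFrom (g : List String) (dept : Option String)
    (option : List (String × String)) : List (String × String) × Option String :=
  g.foldl
    (fun (st : List (String × String) × Option String) t =>
      if PySem.Str.strIsalpha t then (st.1, some t)
      else match st.2 with
        | some d => (st.1 ++ [(d, t)], st.2)
        | none => st)
    (option, dept)

theorem pvParseGroupFrom_nil_option (g : List String) (dept : Option String) :
    pvParseGroupFrom g dept [] = pvParseGroup g dept := rfl

-- B's second phase started mid-group
def pvPhaseFrom : List (List String) → List String → Option String →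
    List (String × String) → List (List (String × String)) → List (List (String × String))
  | [], c, dept, option, result =>
    let od := pvParseGroupFrom c dept option
    if od.1 ≠ [] then result ++ [od.1] else result
  | g :: gs, c, dept, option, result =>
    let od := pvParseGroupFrom g dept option
    pvPhaseFrom gs c od.2 [] (result ++ [od.1])

-- pvPhaseFrom with empty option is B's second fold + final step
theorem pvPhaseFrom_eq_fold (gs : List (List String)) :
    ∀ (c : List String) (dept : Option String) (result : List (List (String × String))),
    pvPhaseFrom gs c dept [] result
    = (let rd := gs.foldl
        (fun (p : List (List (String × String)) × Option String) g =>
          let od := pvParseGroup g p.2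
          (p.1 ++ [od.1], od.2))
        (result, dept)
       let od := pvParseGroup c rd.2
       if od.1 ≠ [] then rd.1 ++ [od.1] else rd.1) := by
  induction gs with
  | nil => intro c dept result; rfl
  | cons g gs ih =>
    intro c dept result
    simp only [pvPhaseFrom, List.foldl, pvParseGroupFrom_nil_option]
    exact ih _ _ _

-- the main B-side invariant
theorem pvB_run (ts : List String) :
    ∀ (cur : List String) (dept : Option String) (option : List (String × String))
      (result : List (List (String × String))),
    pvPhaseFrom (pvSplitOr ts cur).1 (pvSplitOr ts cur).2 dept option result
    = result ++ pvRun ts (pvParseGroupFrom cur dept option).2 (pvParseGroupFrom cur dept option).1 := by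
  induction ts with
  | nil =>
    intro cur dept option result
    simp only [pvSplitOr, pvPhaseFrom, pvRun]
    split <;> simp
  | cons t ts ih =>
    intro cur dept option result
    by_cases hor : t == "or"
    · simp only [pvSplitOr, hor, reduceIte, pvPhaseFrom, pvRun]
      rw [ih]
      simp [pvParseGroupFrom, List.foldl]
    · have hstep : pvParseGroupFrom (cur ++ [t]) dept option
        = (let st := pvParseGroupFrom cur dept option
           if PySem.Str.strIsalpha t then (st.1, some t)
           else match st.2 with
             | some d => (st.1 ++ [(d, t)], st.2)
             | none => st) := by
        simp [pvParseGroupFrom, List.foldl_append]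
      simp only [pvSplitOr, hor, Bool.false_eq_true, reduceIte, pvRun]
      rw [ih, hstep]
      simp only [PySem.Str.strIsalpha_eq]
      by_cases ha : PySem.Chars.strIsalpha t.toList
      · simp [ha]
      · cases hd : (pvParseGroupFrom cur dept option).2 with
        | none => simp [ha, hd]
        | some d => simp [ha, hd]

-- ===== VERDICT (by name: the statement is the Claim_ definition above) =====
theorem basic_parse_spec : Claim_equal_basic_parse := by
  intro astr _
  unfold Spec_basic_parse basic_parse basic_parse_alt
  rw [pvA_run]
  dsimp only []
  rw [pvB_split]
  rw [← pvPhaseFrom_eq_fold]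
  simp only [List.nil_append]
  rw [pvB_run]
  simp [pvParseGroupFrom]
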